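-- pv_equiv track=rewrite | github.com/primap-community/climate_categories | data_generation/IPCC2006.py | split_code_name
-- ===== SOURCE A (Python) =====
-- def split_code_name(code_name):
--     s = code_name.split()
--     code_ended = False
--     code_parts = []
--     name_parts = []
--     for si in s:
--         if code_ended:
--             name_parts.append(si)
--         elif si.isdigit() or len(si) <= 2 or (len(si) > 2 and si == "iii"):
--             code_parts.append(si)
--         else:
--             code_ended = True
--             name_parts.append(si)
--     return code_parts, " ".join(name_parts)
-- ===== SOURCE B (Python) =====
-- def split_code_name(code_name):
--     s = code_name.split()
--
--     def is_code(si):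
--         return si.isdigit() or len(si) <= 2 or si == "iii"
--
--     idx = next((i for i, si in enumerate(s) if not is_code(si)), len(s))
--     return s[:idx], " ".join(s[idx:])
-- ===== Notes on version B (the rewrite author's own statement) =====
-- stated objective: simpler
-- what changed: Replaces the flag-driven per-token dispatch loop with boundary-finding (first token failing the code predicate) followed by two slices and a join.
import Mathlib
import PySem

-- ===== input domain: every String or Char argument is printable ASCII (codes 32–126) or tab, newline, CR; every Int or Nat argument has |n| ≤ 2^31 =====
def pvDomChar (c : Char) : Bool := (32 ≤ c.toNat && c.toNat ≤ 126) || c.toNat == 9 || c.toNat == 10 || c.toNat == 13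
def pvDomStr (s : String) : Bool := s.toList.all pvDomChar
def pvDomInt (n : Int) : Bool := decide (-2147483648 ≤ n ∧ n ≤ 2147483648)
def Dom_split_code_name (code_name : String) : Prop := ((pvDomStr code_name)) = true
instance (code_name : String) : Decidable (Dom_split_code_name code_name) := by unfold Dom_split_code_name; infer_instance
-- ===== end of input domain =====

-- B replaces A's flag-driven loop by finding the boundary index of the first non-code token and slicing; simpler, same O(n) cost.

-- ===== PORT A =====
def split_code_name (code_name : String) : List String × String :=
  let s := PySem.Str.split₀ code_name
  let st := s.foldl
    (fun (acc : Bool × List String × List String) si =>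
      let codeEnded := acc.1
      let codeParts := acc.2.1
      let nameParts := acc.2.2
      if codeEnded then (codeEnded, codeParts, nameParts ++ [si])
      else if PySem.Str.strIsdigit si || decide (PySem.Str.len si ≤ 2)
              || (decide (PySem.Str.len si > 2) && si == "iii") then
        (codeEnded, codeParts ++ [si], nameParts)
      else (true, codeParts, nameParts ++ [si]))
    (false, [], [])
  (st.2.1, PySem.Str.join " " st.2.2)

-- ===== PORT B =====
def isCode (si : String) : Bool :=
  PySem.Str.strIsdigit si || decide (PySem.Str.len si ≤ 2) || si == "iii"

def split_code_name_alt (code_name : String) : List String × String :=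
  let s := PySem.Str.split₀ code_name
  let idx := s.findIdx (fun si => !isCode si)
  (s.take idx, PySem.Str.join " " (s.drop idx))

-- ===== PRECONDITION & SPEC =====
def Spec_split_code_name (code_name : String) (out : List String × String) : Prop := out = split_code_name_alt code_name
instance (code_name : String) (out : List String × String) : Decidable (Spec_split_code_name code_name out) := by unfold Spec_split_code_name; infer_instance

-- ===== CLAIM (what is proved, stated in full; the proofs are below) =====
def Claim_equal_split_code_name : Prop := ∀ (code_name : String), Dom_split_code_name code_name → Spec_split_code_name code_name (split_code_name code_name)

-- ===== LEMMAS AND PROOFS =====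

-- A's three-way test equals B's predicate: "iii" has length 3 > 2.
theorem testA_eq_isCode (si : String) :
    (PySem.Str.strIsdigit si || decide (PySem.Str.len si ≤ 2)
      || (decide (PySem.Str.len si > 2) && si == "iii")) = isCode si := by
  unfold isCode
  by_cases h : si = "iii"
  · subst h; decide
  · have h2 : (si == "iii") = false := by simp [h]
    simp [h2]

def stepA (acc : Bool × List String × List String) (si : String) :
    Bool × List String × List String :=
  if acc.1 then (acc.1, acc.2.1, acc.2.2 ++ [si])
  else if PySem.Str.strIsdigit si || decide (PySem.Str.len si ≤ 2)
          || (decide (PySem.Str.len si > 2) && si == "iii") then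
    (acc.1, acc.2.1 ++ [si], acc.2.2)
  else (true, acc.2.1, acc.2.2 ++ [si])

theorem foldA_true (s : List String) (cp np : List String) :
    s.foldl stepA (true, cp, np) = (true, cp, np ++ s) := by
  induction s generalizing np with
  | nil => simp
  | cons x xs ih => simp [stepA, ih]

theorem foldA_false (s : List String) (cp np : List String) :
    s.foldl stepA (false, cp, np) =
      (decide (s.findIdx (fun si => !isCode si) < s.length),
       cp ++ s.take (s.findIdx (fun si => !isCode si)),
       np ++ s.drop (s.findIdx (fun si => !isCode si))) := by
  induction s generalizing cp np with
  | nil => simp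
  | cons x xs ih =>
    by_cases hx : isCode x
    · have hstep : stepA (false, cp, np) x = (false, cp ++ [x], np) := by
        simp only [stepA]
        rw [testA_eq_isCode]
        simp [hx]
      simp only [List.foldl_cons, hstep, ih]
      simp [List.findIdx_cons, hx]
    · have hstep : stepA (false, cp, np) x = (true, cp, np ++ [x]) := by
        simp only [stepA]
        rw [testA_eq_isCode]
        simp [hx]
      simp only [List.foldl_cons, hstep, foldA_true]
      simp [List.findIdx_cons, hx]

-- ===== VERDICT (by name: the statement is the Claim_ definition above) =====
theorem split_code_name_spec : Claim_equal_split_code_name := by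
  intro code_name _
  unfold Spec_split_code_name split_code_name split_code_name_alt
  have h := foldA_false (PySem.Str.split₀ code_name) [] []
  simp only [show
      (fun (acc : Bool × List String × List String) si =>
        if acc.1 then (acc.1, acc.2.1, acc.2.2 ++ [si])
        else if PySem.Str.strIsdigit si || decide (PySem.Str.len si ≤ 2)
                || (decide (PySem.Str.len si > 2) && si == "iii") then
          (acc.1, acc.2.1 ++ [si], acc.2.2)
        else (true, acc.2.1, acc.2.2 ++ [si])) = stepA from rfl]
  simp [h]
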